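-- pv_equiv track=rewrite | github.com/yukeshwarp/AttorneyAI-Developmental | models.py | replace_disallowed_words
-- ===== SOURCE A (Python) =====
-- def replace_disallowed_words(text):
--     disallowed_words = {
--         "sexual": "xxxxxx",
--         "sex": "xxx",
--         "hate": "xxxx",
--     }
--     for word, replacement in disallowed_words.items():
--         text = text.replace(word, replacement)
--     # Ensure single paragraph output
--     text = " ".join(text.split())
--     return text
-- ===== SOURCE B (Python) =====
-- def replace_disallowed_words(text):
--     # All three replacements are length-preserving ("sexual"->"xxxxxx", "sex"->"xxx",
--     # "hate"->"xxxx"), so each pass just overwrites matched characters with 'x'.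
--     # B does the overwriting in one mutable character buffer instead of building
--     # three new strings with str.replace.
--     chars = list(text)
--     for word in ("sexual", "sex", "hate"):
--         n = len(word)
--         w = list(word)
--         i = 0
--         while i + n <= len(chars):
--             if chars[i:i + n] == w:
--                 chars[i:i + n] = "x" * n
--                 i += n
--             else:
--                 i += 1
--     return " ".join("".join(chars).split())
-- ===== Notes on version B (the rewrite author's own statement) =====
-- stated objective: alternative
-- what changed: B exploits that all three replacements are length-preserving: instead of three str.replace passes each allocating a new string, it overwrites each matched banned word with mask characters inside one mutable character buffer via an explicit index scan, then applies the same whitespace normalization.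
import Mathlib
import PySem

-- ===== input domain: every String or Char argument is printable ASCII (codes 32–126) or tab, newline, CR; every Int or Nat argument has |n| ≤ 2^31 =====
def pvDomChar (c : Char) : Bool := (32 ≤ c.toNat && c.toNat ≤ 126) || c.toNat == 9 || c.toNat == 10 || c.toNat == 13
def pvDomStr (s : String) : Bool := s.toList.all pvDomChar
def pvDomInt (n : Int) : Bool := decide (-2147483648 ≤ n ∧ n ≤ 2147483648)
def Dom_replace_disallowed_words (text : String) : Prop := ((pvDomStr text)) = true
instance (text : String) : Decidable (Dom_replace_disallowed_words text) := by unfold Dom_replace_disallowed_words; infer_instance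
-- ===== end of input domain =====

-- B masks the banned words in place in one character buffer (all replacements are
-- length-preserving writes of 'x') instead of A's three str.replace passes; objective: alternative.

-- ===== PORT A =====
def replace_disallowed_words (text : String) : String :=
  let t1 := PySem.Str.replace text "sexual" "xxxxxx"
  let t2 := PySem.Str.replace t1 "sex" "xxx"
  let t3 := PySem.Str.replace t2 "hate" "xxxx"
  PySem.Str.join " " (PySem.Str.split₀ t3)

-- ===== PORT B =====
-- Source B's while-loop over the char buffer, as structural recursion on the tail:
-- on a match overwrite with 'x's and jump past it, else keep the char and step one.
def maskGo (w : List Char) : List Char → List Char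
  | [] => []
  | c :: t =>
    if w.isPrefixOf (c :: t) then
      List.replicate w.length 'x' ++ maskGo w (t.drop (w.length - 1))
    else
      c :: maskGo w t
termination_by l => l.length
decreasing_by
  · simp only [List.length_cons, List.length_drop]; omega
  · simp only [List.length_cons]; omega

def replace_disallowed_words_alt (text : String) : String :=
  let cs := maskGo "hate".toList (maskGo "sex".toList (maskGo "sexual".toList text.toList))
  PySem.Str.join " " (PySem.Str.split₀ (String.ofList cs))

-- ===== PRECONDITION & SPEC =====
def Spec_replace_disallowed_words (text : String) (out : String) : Prop := out = replace_disallowed_words_alt text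
instance (text : String) (out : String) : Decidable (Spec_replace_disallowed_words text out) := by unfold Spec_replace_disallowed_words; infer_instance

-- ===== CLAIM (what is proved, stated in full; the proofs are below) =====
def Claim_equal_replace_disallowed_words : Prop := ∀ (text : String), Dom_replace_disallowed_words text → Spec_replace_disallowed_words text (replace_disallowed_words text)

-- ===== LEMMAS AND PROOFS =====

theorem replace_go_eq_maskGo (old : List Char) (hold : old ≠ []) :
    ∀ (fuel : Nat) (l acc : List Char), l.length ≤ fuel →
      PySem.Chars.replace.go old (List.replicate old.length 'x') fuel l acc
        = acc.reverse ++ maskGo old l := by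
  intro fuel
  induction fuel with
  | zero =>
    intro l acc hl
    have : l = [] := List.length_eq_zero_iff.mp (Nat.le_zero.mp hl)
    subst this
    simp [PySem.Chars.replace.go, maskGo]
  | succ n ih =>
    intro l acc hl
    cases l with
    | nil => simp [PySem.Chars.replace.go, maskGo]
    | cons c t =>
      rw [PySem.Chars.replace.go]
      by_cases hp : old.isPrefixOf (c :: t)
      · have hlen : 1 ≤ old.length := by
          cases old with
          | nil => exact absurd rfl hold
          | cons _ _ => simp
        rw [if_pos hp]
        have hdrop : (c :: t).drop old.length = t.drop (old.length - 1) := by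
          cases old with
          | nil => exact absurd rfl hold
          | cons _ _ => simp
        rw [ih _ _ (by simp only [hdrop, List.length_drop]; simp only [List.length_cons] at hl; omega)]
        rw [maskGo, if_pos hp, hdrop]
        simp
      · rw [if_neg hp, ih _ _ (by simpa using Nat.lt_succ_iff.mp (by simpa using hl)),
          maskGo, if_neg hp]
        simp

theorem replace_eq_maskGo (old : List Char) (hold : old ≠ []) (s : List Char) :
    PySem.Chars.replace s old (List.replicate old.length 'x') = maskGo old s := by
  rw [PySem.Chars.replace]
  rw [if_neg (by simpa using hold)]
  simpa using replace_go_eq_maskGo old hold s.length s [] le_rfl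

-- ===== VERDICT (by name: the statement is the Claim_ definition above) =====
theorem replace_disallowed_words_spec : Claim_equal_replace_disallowed_words := by
  intro text _
  unfold Spec_replace_disallowed_words replace_disallowed_words replace_disallowed_words_alt
  have h1 : "xxxxxx".toList = List.replicate ("sexual".toList).length 'x' := by decide
  have h2 : "xxx".toList = List.replicate ("sex".toList).length 'x' := by decide
  have h3 : "xxxx".toList = List.replicate ("hate".toList).length 'x' := by decide
  have key : (PySem.Str.replace (PySem.Str.replace (PySem.Str.replace text "sexual" "xxxxxx") "sex" "xxx") "hate" "xxxx")
      = String.ofList (maskGo "hate".toList (maskGo "sex".toList (maskGo "sexual".toList text.toList))) := by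
    simp only [PySem.Str.replace, String.toList_ofList, h1, h2, h3]
    rw [replace_eq_maskGo _ (by decide), replace_eq_maskGo _ (by decide),
        replace_eq_maskGo _ (by decide)]
  simp only [key]
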